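-- pv_equiv track=rewrite | github.com/jgruselius/misc | Python/index_color_balance.py | count_base_by_pos
-- ===== SOURCE A (Python) =====
-- def count_base_by_pos(seqs):
--     c = []
--     for seq in seqs:
--         for i, nt in enumerate(seq):
--             if i >= len(c):
--                 c.append({"A": 0, "C": 0, "T": 0, "G": 0})
--             c[i][nt] += 1
--     return c
-- ===== SOURCE B (Python) =====
-- def count_base_by_pos(seqs):
--     # Column-major: compute the number of positions once, then count each
--     # column in a fresh dict (KeyError on non-ACTG characters, as before).
--     n = max((len(s) for s in seqs), default=0)
--     result = []
--     for i in range(n):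
--         d = {"A": 0, "C": 0, "T": 0, "G": 0}
--         for s in seqs:
--             if i < len(s):
--                 d[s[i]] += 1
--         result.append(d)
--     return result
-- ===== Notes on version B (the rewrite author's own statement) =====
-- stated objective: alternative
-- what changed: Replaces the row-major incremental fill (one running list of dicts grown and indexed while scanning each sequence) with a column-major decomposition: compute the number of positions once, then fill a fresh dict per position by scanning that column across all sequences.
import Mathlib
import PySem

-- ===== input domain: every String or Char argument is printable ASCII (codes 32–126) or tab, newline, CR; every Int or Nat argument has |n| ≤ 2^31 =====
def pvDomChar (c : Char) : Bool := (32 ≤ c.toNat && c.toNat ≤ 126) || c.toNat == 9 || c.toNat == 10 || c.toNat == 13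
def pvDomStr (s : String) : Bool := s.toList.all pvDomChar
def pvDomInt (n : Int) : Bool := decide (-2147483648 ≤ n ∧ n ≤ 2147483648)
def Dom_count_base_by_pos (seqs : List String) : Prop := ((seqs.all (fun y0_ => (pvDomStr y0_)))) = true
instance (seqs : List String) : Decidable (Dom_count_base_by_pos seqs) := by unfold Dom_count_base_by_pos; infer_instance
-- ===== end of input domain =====

-- B replaces A's row-major incremental dict fill by a column-major decomposition
-- (max length once, then per-position column counts); objective: alternative, same cost.

-- ===== PORT A =====
-- the fresh dict {"A": 0, "C": 0, "T": 0, "G": 0}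
def pvFresh : List (String × Int) := [("A", 0), ("C", 0), ("T", 0), ("G", 0)]

-- d[nt] += 1 : increment the value at the first matching key, in place
-- (Python raises KeyError on a missing key; Pre_ excludes exactly those inputs)
def pvIncr (d : List (String × Int)) (k : String) : List (String × Int) :=
  match d with
  | [] => []
  | (k', v) :: rest => if k' = k then (k', v + 1) :: rest else (k', v) :: pvIncr rest k

-- the inner `for i, nt in enumerate(seq)` loop of A, state = the running list c
def pvAInner : List (List (String × Int)) → Nat → List Char → List (List (String × Int))
  | cs, _, [] => cs
  | cs, i, nt :: rest =>
      let cs' := if cs.length ≤ i then cs ++ [pvFresh] else cs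
      pvAInner (cs'.set i (pvIncr (cs'.getD i []) (String.ofList [nt]))) (i + 1) rest

def count_base_by_pos (seqs : List String) : List (List (String × Int)) :=
  seqs.foldl (fun cs s => pvAInner cs 0 s.toList) []

-- ===== PORT B =====
-- `if i < len(s): d[s[i]] += 1` is ported as a match on s.toList[i]? (some ⟷ the guard holds)
def count_base_by_pos_alt (seqs : List String) : List (List (String × Int)) :=
  let n := (seqs.map String.length).foldl max 0
  (List.range n).map (fun i =>
    seqs.foldl (fun d s =>
      match s.toList[i]? with
      | some ch => pvIncr d (String.ofList [ch])
      | none => d) pvFresh)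

-- ===== PRECONDITION & SPEC =====
-- Pre_ excludes inputs containing any character other than A/C/T/G: there A raises
-- KeyError (`c[i][nt] += 1` with nt absent from the dict) and returns nothing.
def Pre_count_base_by_pos (seqs : List String) : Prop :=
  (seqs.all (fun s => s.toList.all (fun c => c == 'A' || c == 'C' || c == 'T' || c == 'G'))) = true
instance (seqs : List String) : Decidable (Pre_count_base_by_pos seqs) := by
  unfold Pre_count_base_by_pos; infer_instance

def pvWitness_count_base_by_pos : List String := ["ACT", "GGATG"]

def Spec_count_base_by_pos (seqs : List String) (out : List (List (String × Int))) : Prop :=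
  out = count_base_by_pos_alt seqs
instance (seqs : List String) (out : List (List (String × Int))) : Decidable (Spec_count_base_by_pos seqs out) := by
  unfold Spec_count_base_by_pos; infer_instance

-- ===== CLAIM (what is proved, stated in full; the proofs are below) =====
def Claim_equal_count_base_by_pos : Prop := ∀ (seqs : List String), Dom_count_base_by_pos seqs → Pre_count_base_by_pos seqs → Spec_count_base_by_pos seqs (count_base_by_pos seqs)

-- ===== LEMMAS AND PROOFS =====

-- abstraction helpers (B's three let-bound pieces, named for the proof)
def pvMaxLen (seqs : List String) : Nat := (seqs.map String.length).foldl max 0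

def pvColAt (seqs : List String) (i : Nat) : List Char :=
  seqs.filterMap (fun s => s.toList[i]?)

def pvDictOf (col : List Char) : List (String × Int) :=
  col.foldl (fun d ch => pvIncr d (String.ofList [ch])) pvFresh

def pvColsOf (seqs : List String) : List (List (String × Int)) :=
  (List.range (pvMaxLen seqs)).map (fun i => pvDictOf (pvColAt seqs i))

-- zip-with-padding characterisation of A's inner loop
def pvMerge : List (List (String × Int)) → List Char → List (List (String × Int))
  | ds, [] => ds
  | [], ch :: rest => pvIncr pvFresh (String.ofList [ch]) :: pvMerge [] rest
  | d :: ds, ch :: rest => pvIncr d (String.ofList [ch]) :: pvMerge ds rest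

theorem foldl_incr_filterMap (seqs : List String) (i : Nat) :
    ∀ (d : List (String × Int)),
    seqs.foldl (fun d s =>
      match s.toList[i]? with
      | some ch => pvIncr d (String.ofList [ch])
      | none => d) d
    = (seqs.filterMap (fun s => s.toList[i]?)).foldl (fun d ch => pvIncr d (String.ofList [ch])) d := by
  induction seqs with
  | nil => intro d; rfl
  | cons s rest ih =>
    intro d
    cases h : s.toList[i]? <;> simp [List.foldl_cons, h, ih]

theorem alt_eq_colsOf (seqs : List String) : count_base_by_pos_alt seqs = pvColsOf seqs := by
  unfold count_base_by_pos_alt pvColsOf pvMaxLen pvDictOf pvColAt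
  refine List.map_congr_left ?_
  intro i _
  exact foldl_incr_filterMap seqs i pvFresh

theorem aInner_merge (chars : List Char) : ∀ (i : Nat) (cs : List (List (String × Int))),
    i ≤ cs.length → pvAInner cs i chars = cs.take i ++ pvMerge (cs.drop i) chars := by
  induction chars with
  | nil => intro i cs h; simp [pvAInner, pvMerge]
  | cons ch rest ih =>
    intro i cs h
    rcases lt_or_eq_of_le h with hlt | heq
    · have hnot : ¬ cs.length ≤ i := by omega
      simp only [pvAInner, hnot, if_false]
      rw [ih (i + 1) _ (by simp; omega)]
      have hgd : cs.getD i [] = cs[i]'hlt := List.getD_eq_getElem cs [] hlt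
      rw [hgd]
      rw [List.drop_eq_getElem_cons hlt]
      simp only [pvMerge]
      rw [List.set_eq_take_append_cons_drop, if_pos hlt]
      rw [List.take_append, List.drop_append]
      simp [List.length_take, Nat.min_eq_left (le_of_lt hlt), List.take_of_length_le, List.drop_eq_nil_of_le]
    · subst heq
      simp only [pvAInner, le_refl, if_true]
      have hget : (cs ++ [pvFresh]).getD cs.length [] = pvFresh := by
        simp [List.getD_eq_getElem?_getD]
      have hset : (cs ++ [pvFresh]).set cs.length (pvIncr ((cs ++ [pvFresh]).getD cs.length []) (String.ofList [ch]))
          = cs ++ [pvIncr pvFresh (String.ofList [ch])] := by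
        rw [hget, List.set_append_right _ _ (le_refl _)]
        simp
      rw [hset, ih (cs.length + 1) _ (by simp)]
      simp [List.take_of_length_le, List.drop_eq_nil_of_le, pvMerge]

theorem foldl_merge (seqs : List String) :
    count_base_by_pos seqs = seqs.foldl (fun cs s => pvMerge cs s.toList) [] := by
  unfold count_base_by_pos
  congr 1
  funext cs s
  rw [aInner_merge s.toList 0 cs (Nat.zero_le _)]
  simp

theorem dictOf_append (col : List Char) (ch : Char) :
    pvDictOf (col ++ [ch]) = pvIncr (pvDictOf col) (String.ofList [ch]) := by
  simp [pvDictOf, List.foldl_append]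

theorem pvMerge_getElem? (chars : List Char) : ∀ (ds : List (List (String × Int))) (i : Nat),
    (pvMerge ds chars)[i]? =
      match ds[i]?, chars[i]? with
      | some d, some ch => some (pvIncr d (String.ofList [ch]))
      | some d, none => some d
      | none, some ch => some (pvIncr pvFresh (String.ofList [ch]))
      | none, none => none := by
  induction chars with
  | nil => intro ds i; cases h : ds[i]? <;> simp [pvMerge, h]
  | cons ch rest ih =>
    intro ds i
    match ds, i with
    | [], 0 => simp [pvMerge]
    | [], i + 1 =>
      simp only [pvMerge, List.getElem?_cons_succ]
      rw [ih [] i]; simp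
    | d :: ds, 0 => simp [pvMerge]
    | d :: ds, i + 1 =>
      simp only [pvMerge, List.getElem?_cons_succ]
      rw [ih ds i]

theorem le_foldl_max (xs : List Nat) : ∀ (a : Nat), a ≤ xs.foldl max a ∧ ∀ x ∈ xs, x ≤ xs.foldl max a := by
  induction xs with
  | nil => intro a; simp
  | cons y ys ih =>
    intro a
    refine ⟨le_trans (le_max_left a y) (ih (max a y)).1, ?_⟩
    intro x hx
    rcases List.mem_cons.mp hx with rfl | h
    · exact le_trans (le_max_right a _) (ih _).1
    · exact (ih (max a y)).2 x h

theorem colAt_nil_of_maxLen_le (seqs : List String) (i : Nat) (h : pvMaxLen seqs ≤ i) :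
    pvColAt seqs i = [] := by
  unfold pvColAt
  rw [List.filterMap_eq_nil_iff]
  intro s hs
  have hlen : s.length ≤ pvMaxLen seqs :=
    (le_foldl_max (seqs.map String.length) 0).2 s.length (List.mem_map_of_mem hs)
  have hl : s.toList.length ≤ i := by
    have h2 : s.toList.length = s.length := String.length_toList
    omega
  simp [List.getElem?_eq_none_iff.mpr hl]

theorem colAt_append (seqs : List String) (s : String) (i : Nat) :
    pvColAt (seqs ++ [s]) i = pvColAt seqs i ++ (s.toList[i]?).toList := by
  unfold pvColAt
  rw [List.filterMap_append]
  cases h : s.toList[i]? <;> simp [h]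

theorem maxLen_append (seqs : List String) (s : String) :
    pvMaxLen (seqs ++ [s]) = max (pvMaxLen seqs) s.length := by
  unfold pvMaxLen
  rw [List.map_append, List.foldl_append]
  simp

theorem colsOf_getElem? (seqs : List String) (i : Nat) :
    (pvColsOf seqs)[i]? = if i < pvMaxLen seqs then some (pvDictOf (pvColAt seqs i)) else none := by
  unfold pvColsOf
  by_cases h : i < pvMaxLen seqs <;> simp [h]

theorem merge_colsOf (seqs : List String) (s : String) :
    pvMerge (pvColsOf seqs) s.toList = pvColsOf (seqs ++ [s]) := by
  apply List.ext_getElem?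
  intro i
  rw [pvMerge_getElem?, colsOf_getElem?, colsOf_getElem?, maxLen_append, colAt_append]
  by_cases hm : i < pvMaxLen seqs <;> by_cases hs : i < s.toList.length
  · have hch : s.toList[i]? = some (s.toList[i]'hs) := List.getElem?_eq_getElem hs
    have : i < max (pvMaxLen seqs) s.length := by omega
    simp only [if_pos hm, hch, if_pos this, Option.toList_some, dictOf_append]
  · have hch : s.toList[i]? = none := List.getElem?_eq_none_iff.mpr (by omega)
    have : i < max (pvMaxLen seqs) s.length := by omega
    rw [if_pos hm, hch, if_pos this]
    simp
  · have hch : s.toList[i]? = some (s.toList[i]'hs) := List.getElem?_eq_getElem hs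
    have hsl : i < s.length := by
      have h2 : s.toList.length = s.length := String.length_toList
      omega
    have : i < max (pvMaxLen seqs) s.length := by omega
    rw [if_neg hm, hch, if_pos this]
    simp only [colAt_nil_of_maxLen_le seqs i (by omega), List.nil_append, Option.toList_some]
    have hd : pvDictOf ([] ++ [s.toList[i]'hs]) = pvIncr (pvDictOf []) (String.ofList [s.toList[i]'hs]) :=
      dictOf_append [] _
    simp only [List.nil_append] at hd
    rw [hd]
    rfl
  · have hch : s.toList[i]? = none := List.getElem?_eq_none_iff.mpr (by omega)
    have hsl : ¬ i < s.length := by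
      have h2 : s.toList.length = s.length := String.length_toList
      omega
    rw [if_neg hm, hch, if_neg (by omega)]

theorem cbp_eq_colsOf (seqs : List String) : count_base_by_pos seqs = pvColsOf seqs := by
  rw [foldl_merge]
  induction seqs using List.reverseRecOn with
  | nil => rfl
  | append_singleton seqs s ih =>
    rw [List.foldl_append, List.foldl_cons, List.foldl_nil, ih, merge_colsOf]

-- ===== VERDICT (by name: the statement is the Claim_ definition above) =====
theorem count_base_by_pos_spec : Claim_equal_count_base_by_pos := by
  intro seqs _ _
  unfold Spec_count_base_by_pos
  exact (cbp_eq_colsOf seqs).trans (alt_eq_colsOf seqs).symm
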